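-- pv_equiv track=rewrite | github.com/cgropp1/Compainion_App | room_designs_helper.py | split_attributes
-- ===== SOURCE A (Python) =====
-- def split_attributes(s):
--     """Splits a string of key=value pairs on commas that are not inside brackets."""
--     attrs = []
--     current = ""
--     bracket_stack = []
--     for char in s:
--         if char in "[{":
--             bracket_stack.append(char)
--             current += char
--         elif char in "]}":
--             if bracket_stack:
--                 bracket_stack.pop()
--             current += char
--         elif char == "," and not bracket_stack:
--             attrs.append(current.strip())
--             current = ""
--         else:
--             current += char
--     if current:
--         attrs.append(current.strip())
--     return attrs
-- ===== SOURCE B (Python) =====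
-- def split_attributes(s):
--     """Splits a string of key=value pairs on commas that are not inside brackets.
--
--     Two-pass version: first record the indices of top-level commas while
--     tracking bracket depth, then slice the string at those boundaries."""
--     cuts = []
--     depth = 0
--     for i, ch in enumerate(s):
--         if ch in "[{":
--             depth += 1
--         elif ch in "]}":
--             if depth != 0:
--                 depth -= 1
--         elif ch == "," and depth == 0:
--             cuts.append(i)
--     parts = []
--     start = 0
--     for c in cuts:
--         parts.append(s[start:c].strip())
--         start = c + 1
--     last = s[start:]
--     if last:
--         parts.append(last.strip())
--     return parts
-- ===== Notes on version B (the rewrite author's own statement) =====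
-- stated objective: alternative
-- what changed: B replaces A's single scan that accumulates the current segment character by character (with an explicit bracket stack) by a two-pass scheme: a first pass records only the indices of top-level commas using an integer depth counter, a second pass slices the string at those boundaries and strips each slice.
import Mathlib
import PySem

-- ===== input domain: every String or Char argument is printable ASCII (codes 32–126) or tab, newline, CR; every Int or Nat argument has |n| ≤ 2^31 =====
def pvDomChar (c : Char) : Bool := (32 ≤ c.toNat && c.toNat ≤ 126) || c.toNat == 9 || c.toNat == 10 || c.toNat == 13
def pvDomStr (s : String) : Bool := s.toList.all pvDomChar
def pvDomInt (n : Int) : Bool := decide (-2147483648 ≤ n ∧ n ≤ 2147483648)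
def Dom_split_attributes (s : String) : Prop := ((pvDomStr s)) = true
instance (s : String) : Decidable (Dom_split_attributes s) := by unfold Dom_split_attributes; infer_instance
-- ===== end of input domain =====

-- B: same task by a different decomposition — record top-level comma indices, then slice; same O(n) cost.

-- ===== PORT A =====
def split_attributes (s : String) : List String :=
  let r := s.toList.foldl
    (fun (st : List String × List Char × List Char) ch =>
      if ch = '[' ∨ ch = '{' then (st.1, st.2.1 ++ [ch], st.2.2 ++ [ch])
      else if ch = ']' ∨ ch = '}' then (st.1, st.2.1 ++ [ch], st.2.2.dropLast)
      else if ch = ',' ∧ st.2.2 = [] then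
        (st.1 ++ [String.ofList (PySem.Chars.strip st.2.1)], [], st.2.2)
      else (st.1, st.2.1 ++ [ch], st.2.2))
    ([], [], [])
  if r.2.1 ≠ [] then r.1 ++ [String.ofList (PySem.Chars.strip r.2.1)] else r.1

-- ===== PORT B =====
def split_attributes_alt (s : String) : List String :=
  let sc := (PySem.List.enumerate s.toList 0).foldl
    (fun (st : List Int × Int) p =>
      if p.2 = '[' ∨ p.2 = '{' then (st.1, st.2 + 1)
      else if p.2 = ']' ∨ p.2 = '}' then (st.1, if st.2 ≠ 0 then st.2 - 1 else st.2)
      else if p.2 = ',' ∧ st.2 = 0 then (st.1 ++ [p.1], st.2)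
      else (st.1, st.2))
    ([], 0)
  let pr := sc.1.foldl
    (fun (st : List String × Int) c =>
      (st.1 ++ [String.ofList (PySem.Chars.strip (PySem.List.slice s.toList (some st.2) (some c)))],
       c + 1))
    ([], 0)
  let last := PySem.List.slice s.toList (some pr.2) none
  if last ≠ [] then pr.1 ++ [String.ofList (PySem.Chars.strip last)] else pr.1

-- ===== PRECONDITION & SPEC =====
def Spec_split_attributes (s : String) (out : List String) : Prop := out = split_attributes_alt s
instance (s : String) (out : List String) : Decidable (Spec_split_attributes s out) := by unfold Spec_split_attributes; infer_instance

-- ===== CLAIM (what is proved, stated in full; the proofs are below) =====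
def Claim_equal_split_attributes : Prop := ∀ (s : String), Dom_split_attributes s → Spec_split_attributes s (split_attributes s)

-- ===== LEMMAS AND PROOFS =====

-- prepend `pre` to the first segment (the "current" accumulator made explicit)
def pvHC (pre : List Char) : List (List Char) → List (List Char)
  | [] => [pre]
  | h :: r => (pre ++ h) :: r

-- reference splitter: raw segments of `t` at top-level commas, depth `d`
def pvGo : List Char → Nat → List (List Char)
  | [], _ => [[]]
  | c :: t, d =>
    if c = '[' ∨ c = '{' then pvHC [c] (pvGo t (d+1))
    else if c = ']' ∨ c = '}' then pvHC [c] (pvGo t (d-1))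
    else if c = ',' ∧ d = 0 then [] :: pvGo t d
    else pvHC [c] (pvGo t d)

-- indices (from i) of top-level commas of `t`, depth `d`
def pvCuts : List Char → Nat → Nat → List Nat
  | [], _, _ => []
  | c :: t, i, d =>
    if c = '[' ∨ c = '{' then pvCuts t (i+1) (d+1)
    else if c = ']' ∨ c = '}' then pvCuts t (i+1) (d-1)
    else if c = ',' ∧ d = 0 then i :: pvCuts t (i+1) d
    else pvCuts t (i+1) d

def pvDepth : List Char → Nat → Nat
  | [], d => d
  | c :: t, d =>
    if c = '[' ∨ c = '{' then pvDepth t (d+1)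
    else if c = ']' ∨ c = '}' then pvDepth t (d-1)
    else pvDepth t d

def pvFin (X : List (List Char)) : List String :=
  X.dropLast.map (fun c => String.ofList (PySem.Chars.strip c)) ++
    (if X.getLast?.getD [] ≠ [] then [String.ofList (PySem.Chars.strip (X.getLast?.getD []))] else [])

theorem pvHC_ne_nil (pre : List Char) (X : List (List Char)) : pvHC pre X ≠ [] := by
  cases X <;> simp [pvHC]

theorem pvGo_ne_nil (t : List Char) (d : Nat) : pvGo t d ≠ [] := by
  cases t with
  | nil => simp [pvGo]
  | cons c t =>
    simp only [pvGo]
    split_ifs <;> simp [pvHC_ne_nil]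

theorem pvHC_pvHC (pre : List Char) (c : Char) (X : List (List Char)) :
    pvHC pre (pvHC [c] X) = pvHC (pre ++ [c]) X := by
  cases X <;> simp [pvHC]

theorem pvHC_nil (X : List (List Char)) (h : X ≠ []) : pvHC [] X = X := by
  cases X <;> simp_all [pvHC]

theorem pvFin_cons (c : List Char) (Y : List (List Char)) (h : Y ≠ []) :
    pvFin (c :: Y) = String.ofList (PySem.Chars.strip c) :: pvFin Y := by
  cases Y with
  | nil => exact absurd rfl h
  | cons y ys => simp [pvFin]

-- last element of a nonempty-tailed cons
theorem pvLast_cons (a : List Char) (X : List (List Char)) (h : X ≠ []) :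
    ((a :: X).getLast?).getD [] = (X.getLast?).getD [] := by
  cases X with
  | nil => exact absurd rfl h
  | cons y ys => simp

-- A's loop equals the reference splitter
theorem pvA_loop (t : List Char) (attrs : List String) (cur stack : List Char) :
    (if (t.foldl
      (fun (st : List String × List Char × List Char) ch =>
        if ch = '[' ∨ ch = '{' then (st.1, st.2.1 ++ [ch], st.2.2 ++ [ch])
        else if ch = ']' ∨ ch = '}' then (st.1, st.2.1 ++ [ch], st.2.2.dropLast)
        else if ch = ',' ∧ st.2.2 = [] then
          (st.1 ++ [String.ofList (PySem.Chars.strip st.2.1)], [], st.2.2)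
        else (st.1, st.2.1 ++ [ch], st.2.2))
      (attrs, cur, stack)).2.1 ≠ []
     then (t.foldl
      (fun (st : List String × List Char × List Char) ch =>
        if ch = '[' ∨ ch = '{' then (st.1, st.2.1 ++ [ch], st.2.2 ++ [ch])
        else if ch = ']' ∨ ch = '}' then (st.1, st.2.1 ++ [ch], st.2.2.dropLast)
        else if ch = ',' ∧ st.2.2 = [] then
          (st.1 ++ [String.ofList (PySem.Chars.strip st.2.1)], [], st.2.2)
        else (st.1, st.2.1 ++ [ch], st.2.2))
      (attrs, cur, stack)).1 ++ [String.ofList (PySem.Chars.strip (t.foldl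
      (fun (st : List String × List Char × List Char) ch =>
        if ch = '[' ∨ ch = '{' then (st.1, st.2.1 ++ [ch], st.2.2 ++ [ch])
        else if ch = ']' ∨ ch = '}' then (st.1, st.2.1 ++ [ch], st.2.2.dropLast)
        else if ch = ',' ∧ st.2.2 = [] then
          (st.1 ++ [String.ofList (PySem.Chars.strip st.2.1)], [], st.2.2)
        else (st.1, st.2.1 ++ [ch], st.2.2))
      (attrs, cur, stack)).2.1)]
     else (t.foldl
      (fun (st : List String × List Char × List Char) ch =>
        if ch = '[' ∨ ch = '{' then (st.1, st.2.1 ++ [ch], st.2.2 ++ [ch])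
        else if ch = ']' ∨ ch = '}' then (st.1, st.2.1 ++ [ch], st.2.2.dropLast)
        else if ch = ',' ∧ st.2.2 = [] then
          (st.1 ++ [String.ofList (PySem.Chars.strip st.2.1)], [], st.2.2)
        else (st.1, st.2.1 ++ [ch], st.2.2))
      (attrs, cur, stack)).1)
    = attrs ++ pvFin (pvHC cur (pvGo t stack.length)) := by
  induction t generalizing attrs cur stack with
  | nil =>
    by_cases hcur : cur = [] <;> simp [pvGo, pvHC, pvFin, hcur]
  | cons c t ih =>
    simp only [List.foldl_cons]
    by_cases h1 : c = '[' ∨ c = '{'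
    · simp only [if_pos h1]
      rw [ih]
      simp [pvGo, h1, pvHC_pvHC]
    · by_cases h2 : c = ']' ∨ c = '}'
      · simp only [if_neg h1, if_pos h2]
        rw [ih]
        simp [pvGo, h1, h2, pvHC_pvHC]
      · by_cases h3 : c = ',' ∧ stack = []
        · simp only [if_neg h1, if_neg h2, if_pos h3]
          rw [ih]
          obtain ⟨hc, hs⟩ := h3
          subst hs
          simp only [List.length_nil]
          rw [pvHC_nil _ (pvGo_ne_nil t 0)]
          have hgo : pvGo (c :: t) 0 = [] :: pvGo t 0 := by
            simp [pvGo, hc]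
          rw [hgo]
          have : pvHC cur ([] :: pvGo t 0) = cur :: pvGo t 0 := by simp [pvHC]
          rw [this, pvFin_cons _ _ (pvGo_ne_nil t 0)]
          simp
        · simp only [if_neg h1, if_neg h2, if_neg h3]
          rw [ih]
          simp only [pvGo, if_neg h1, if_neg h2]
          have h3' : ¬(c = ',' ∧ stack.length = 0) := by
            simpa [List.length_eq_zero_iff] using h3
          rw [if_neg h3', pvHC_pvHC]

-- B's scan computes pvCuts
theorem pvB_scan (t : List Char) (i : Nat) (d : Nat) (cuts0 : List Int) :
    (PySem.List.enumerate t (i : Int)).foldl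
      (fun (st : List Int × Int) p =>
        if p.2 = '[' ∨ p.2 = '{' then (st.1, st.2 + 1)
        else if p.2 = ']' ∨ p.2 = '}' then (st.1, if st.2 ≠ 0 then st.2 - 1 else st.2)
        else if p.2 = ',' ∧ st.2 = 0 then (st.1 ++ [p.1], st.2)
        else (st.1, st.2))
      (cuts0, (d : Int))
    = (cuts0 ++ (pvCuts t i d).map (fun n => (n : Int)), ((pvDepth t d : Nat) : Int)) := by
  induction t generalizing i d cuts0 with
  | nil => simp [PySem.List.enumerate_nil, pvCuts, pvDepth]
  | cons c t ih =>
    rw [PySem.List.enumerate_cons, List.foldl_cons]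
    by_cases h1 : c = '[' ∨ c = '{'
    · simp only [if_pos h1]
      have e1 : (d : Int) + 1 = ((d + 1 : Nat) : Int) := by push_cast; ring
      have e2 : (i : Int) + 1 = ((i + 1 : Nat) : Int) := by push_cast; ring
      rw [e1, e2, ih]
      simp [pvCuts, pvDepth, h1]
    · by_cases h2 : c = ']' ∨ c = '}'
      · simp only [if_neg h1, if_pos h2]
        have e1 : (if (d : Int) ≠ 0 then (d : Int) - 1 else (d : Int)) = ((d - 1 : Nat) : Int) := by
          by_cases hd : d = 0
          · simp [hd]
          · simp [hd]; omega
        have e2 : (i : Int) + 1 = ((i + 1 : Nat) : Int) := by push_cast; ring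
        rw [e1, e2, ih]
        simp [pvCuts, pvDepth, h1, h2]
      · by_cases h3 : c = ',' ∧ d = 0
        · have h3' : c = ',' ∧ (d : Int) = 0 := by exact_mod_cast h3
          simp only [if_neg h1, if_neg h2, if_pos h3']
          have e2 : (i : Int) + 1 = ((i + 1 : Nat) : Int) := by push_cast; ring
          rw [e2, ih]
          simp [pvCuts, pvDepth, h3.1, h3.2]
        · have h3' : ¬(c = ',' ∧ (d : Int) = 0) := by
            intro hh; exact h3 ⟨hh.1, by exact_mod_cast hh.2⟩
          simp only [if_neg h1, if_neg h2, if_neg h3']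
          have e2 : (i : Int) + 1 = ((i + 1 : Nat) : Int) := by push_cast; ring
          rw [e2, ih]
          have hcut : pvCuts (c :: t) i d = pvCuts t (i + 1) d := by
            simp [pvCuts, h1, h2]; intro hc hd; exact absurd ⟨hc, hd⟩ h3
          have hdep : pvDepth (c :: t) d = pvDepth t d := by
            simp [pvDepth, h1, h2]
          rw [hcut, hdep]

-- B's second pass reconstructs the segments of the reference splitter
theorem pvB_parts (l : List Char) (t pre : List Char) (b : Nat) (d : Nat)
    (parts0 : List String) (h : l.drop b = pre ++ t) :
    ∃ j : Nat,
      ((pvCuts t (b + pre.length) d).map (fun n => (n : Int))).foldl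
        (fun (st : List String × Int) c =>
          (st.1 ++ [String.ofList (PySem.Chars.strip (PySem.List.slice l (some st.2) (some c)))],
           c + 1))
        (parts0, (b : Int))
      = (parts0 ++ (pvHC pre (pvGo t d)).dropLast.map (fun c => String.ofList (PySem.Chars.strip c)),
         (j : Int))
      ∧ l.drop j = (pvHC pre (pvGo t d)).getLast?.getD [] := by
  induction t generalizing pre b d parts0 with
  | nil =>
    refine ⟨b, ?_, ?_⟩
    · simp [pvCuts, pvGo, pvHC]
    · simpa [pvGo, pvHC] using h
  | cons c t ih =>
    by_cases h1 : c = '[' ∨ c = '{'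
    · have h' : l.drop b = (pre ++ [c]) ++ t := by simpa using h
      obtain ⟨j, e1, e2⟩ := ih (pre ++ [c]) b (d + 1) parts0 h'
      refine ⟨j, ?_, ?_⟩
      · rw [show pvCuts (c :: t) (b + pre.length) d = pvCuts t (b + (pre ++ [c]).length) (d + 1) by
          simp only [pvCuts, if_pos h1]; congr 1; simp; omega]
        rw [e1]
        simp [pvGo, h1, pvHC_pvHC]
      · rw [e2]
        simp [pvGo, h1, pvHC_pvHC]
    · by_cases h2 : c = ']' ∨ c = '}'
      · have h' : l.drop b = (pre ++ [c]) ++ t := by simpa using h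
        obtain ⟨j, e1, e2⟩ := ih (pre ++ [c]) b (d - 1) parts0 h'
        refine ⟨j, ?_, ?_⟩
        · rw [show pvCuts (c :: t) (b + pre.length) d = pvCuts t (b + (pre ++ [c]).length) (d - 1) by
            simp only [pvCuts, if_neg h1, if_pos h2]; congr 1; simp; omega]
          rw [e1]
          simp [pvGo, h1, h2, pvHC_pvHC]
        · rw [e2]
          simp [pvGo, h1, h2, pvHC_pvHC]
      · by_cases h3 : c = ',' ∧ d = 0
        · obtain ⟨hc, hd⟩ := h3
          subst hc hd
          have h' : l.drop (b + pre.length + 1) = [] ++ t := by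
            have hdd : l.drop (b + pre.length + 1) = (l.drop b).drop (pre.length + 1) := by
              rw [List.drop_drop]; ring_nf
            rw [hdd, h, show pre ++ ',' :: t = (pre ++ [',']) ++ t by simp]
            simp
          obtain ⟨j, e1, e2⟩ := ih [] (b + pre.length + 1) 0
            (parts0 ++ [String.ofList (PySem.Chars.strip pre)]) h'
          have hsl : PySem.List.slice l (some (b : Int)) (some ((b + pre.length : Nat) : Int))
              = pre := by
            rw [show ((b + pre.length : Nat) : Int) = (b : Int) + (pre.length : Int) by push_cast; ring]
            rw [PySem.List.slice_natCast_add, h]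
            simp
          refine ⟨j, ?_, ?_⟩
          · have hcuts : (pvCuts (',' :: t) (b + pre.length) 0).map (fun n => (n : Int))
                = ((b + pre.length : Nat) : Int)
                  :: (pvCuts t (b + pre.length + 1) 0).map (fun n => (n : Int)) := by
              rw [show pvCuts (',' :: t) (b + pre.length) 0
                  = (b + pre.length) :: pvCuts t (b + pre.length + 1) 0 by simp [pvCuts]]
              simp
            rw [hcuts, List.foldl_cons]
            simp only [hsl]
            rw [show ((b + pre.length : Nat) : Int) + 1 = ((b + pre.length + 1 : Nat) : Int) by
              push_cast; ring]
            rw [show pvCuts t (b + pre.length + 1) 0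
                = pvCuts t (b + pre.length + 1 + ([] : List Char).length) 0 by simp]
            rw [e1]
            have hgo : pvHC pre (pvGo (',' :: t) 0) = pre :: pvGo t 0 := by
              simp [pvGo, pvHC]
            rw [hgo, List.dropLast_cons_of_ne_nil (pvGo_ne_nil t 0), List.map_cons]
            rw [pvHC_nil _ (pvGo_ne_nil t 0)]
            simp
          · rw [e2, pvHC_nil _ (pvGo_ne_nil t 0)]
            have hgo : pvHC pre (pvGo (',' :: t) 0) = pre :: pvGo t 0 := by
              simp [pvGo, pvHC]
            rw [hgo, pvLast_cons _ _ (pvGo_ne_nil t 0)]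
        · have h' : l.drop b = (pre ++ [c]) ++ t := by simpa using h
          obtain ⟨j, e1, e2⟩ := ih (pre ++ [c]) b d parts0 h'
          refine ⟨j, ?_, ?_⟩
          · rw [show pvCuts (c :: t) (b + pre.length) d = pvCuts t (b + (pre ++ [c]).length) d by
              simp only [pvCuts, if_neg h1, if_neg h2, if_neg h3]; congr 1; simp; omega]
            rw [e1]
            simp only [pvGo, if_neg h1, if_neg h2, if_neg h3, pvHC_pvHC]
          · rw [e2]
            simp only [pvGo, if_neg h1, if_neg h2, if_neg h3, pvHC_pvHC]

-- ===== VERDICT (by name: the statement is the Claim_ definition above) =====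
theorem split_attributes_spec : Claim_equal_split_attributes := by
  intro s _
  unfold Spec_split_attributes split_attributes split_attributes_alt
  have hA := pvA_loop s.toList [] [] []
  simp only [List.length_nil] at hA
  rw [pvHC_nil _ (pvGo_ne_nil s.toList 0)] at hA
  have hScan := pvB_scan s.toList 0 0 []
  obtain ⟨j, e1, e2⟩ := pvB_parts s.toList s.toList [] 0 0 [] (by simp)
  simp only [List.length_nil, Nat.add_zero, List.nil_append] at e1
  rw [pvHC_nil _ (pvGo_ne_nil s.toList 0)] at e1 e2
  simp only [Nat.cast_zero] at hScan e1
  rw [hA, hScan]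
  simp only [List.nil_append, e1]
  rw [PySem.List.slice_from_natCast, e2]
  by_cases hlast : (pvGo s.toList 0).getLast?.getD [] = [] <;>
    simp [pvFin, hlast]
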